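-- pv_equiv track=rewrite | github.com/Prit44421/ai-theory-algorithms | extra/b_and_b_nocycles.py | remove_seen
-- ===== SOURCE A (Python) =====
-- def remove_seen(children, path):
--     """
--     REMOVESEEN(children, path)
--     Remove children that are already in the path (cycle detection)
--
--     Parameters:
--     - children: list of child nodes
--     - path: current path
--
--     Returns:
--     - list of children not in path
--     """
--     # if children is empty then return empty list
--     if not children:
--         return []
--
--     # else
--     # M ← head children
--     M = children[0]
--
--     # if OCCURSIN(M, path)
--     if occurs_in(M, path):
--         # then return REMOVESEEN(tail children, path)
--         return remove_seen(children[1:], path)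
--     # else return M:REMOVESEEN(tail children, path)
--     else:
--         return [M] + remove_seen(children[1:], path)
--
-- def occurs_in(node, lst):
--     """
--     OCCURSIN(node, list)
--     Check if node is in list
--
--     Parameters:
--     - node: node to search for
--     - lst: list to search in
--
--     Returns:
--     - True if node is in list, False otherwise
--     """
--     # if list is empty then return False
--     if not lst:
--         return False
--     # else if node == head list then return True
--     elif node == lst[0]:
--         return True
--     # else return OCCURSIN(node, tail list)
--     else:
--         return occurs_in(node, lst[1:])
-- ===== SOURCE B (Python) =====
-- def remove_seen(children, path):
--     out = []
--     for c in children: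
--         if c not in path:
--             out.append(c)
--     return out
-- ===== Notes on version B (the rewrite author's own statement) =====
-- stated objective: simpler
-- what changed: Replaces the two mutually independent recursions (remove_seen's head/tail recursion and the recursive occurs_in membership helper) with one flat iterative pass over children using Python's built-in 'in' membership test.
import Mathlib
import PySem

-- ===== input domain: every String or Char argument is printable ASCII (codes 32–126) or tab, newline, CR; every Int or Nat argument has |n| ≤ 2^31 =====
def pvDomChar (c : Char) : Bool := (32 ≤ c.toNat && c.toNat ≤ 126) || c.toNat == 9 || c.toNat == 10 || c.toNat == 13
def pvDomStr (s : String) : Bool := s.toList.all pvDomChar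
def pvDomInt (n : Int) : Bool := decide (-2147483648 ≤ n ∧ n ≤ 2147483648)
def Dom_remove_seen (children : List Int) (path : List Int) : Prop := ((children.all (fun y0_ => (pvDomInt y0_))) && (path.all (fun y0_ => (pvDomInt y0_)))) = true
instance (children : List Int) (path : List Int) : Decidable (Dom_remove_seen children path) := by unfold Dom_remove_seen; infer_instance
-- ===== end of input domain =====

-- B replaces A's two recursions (head/tail recursion plus a recursive membership helper) with one flat iterative pass; objective: simpler.

-- ===== PORT A =====
-- recursive OCCURSIN helper, step for step
def occurs_in (node : Int) (lst : List Int) : Bool :=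
  match lst with
  | [] => false
  | h :: t => if node = h then true else occurs_in node t

def remove_seen (children : List Int) (path : List Int) : List Int :=
  match children with
  | [] => []
  | M :: rest =>
    if occurs_in M path then remove_seen rest path
    else [M] ++ remove_seen rest path

-- ===== PORT B =====
-- one iterative pass: fold over children with an accumulator, appending each c with c ∉ path
def remove_seen_alt (children : List Int) (path : List Int) : List Int :=
  children.foldl (fun out c => if path.contains c then out else out ++ [c]) []

-- ===== PRECONDITION & SPEC =====
def Spec_remove_seen (children : List Int) (path : List Int) (out : List Int) : Prop := out = remove_seen_alt children path
instance (children : List Int) (path : List Int) (out : List Int) : Decidable (Spec_remove_seen children path out) := by unfold Spec_remove_seen; infer_instance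

-- ===== CLAIM (what is proved, stated in full; the proofs are below) =====
def Claim_equal_remove_seen : Prop := ∀ (children : List Int) (path : List Int), Dom_remove_seen children path → Spec_remove_seen children path (remove_seen children path)

-- ===== LEMMAS AND PROOFS =====
theorem occurs_in_eq_contains (node : Int) (lst : List Int) : occurs_in node lst = lst.contains node := by
  induction lst with
  | nil => rfl
  | cons h t ih =>
    simp [occurs_in, ih]

theorem foldl_acc (children path acc : List Int) :
    children.foldl (fun out c => if path.contains c then out else out ++ [c]) acc
      = acc ++ children.foldl (fun out c => if path.contains c then out else out ++ [c]) [] := by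
  induction children generalizing acc with
  | nil => simp
  | cons c rest ih =>
    rw [List.foldl_cons, List.foldl_cons]
    by_cases h : path.contains c = true
    · rw [if_pos h, if_pos h]; exact ih acc
    · rw [if_neg h, if_neg h, ih (acc ++ [c]), ih ([] ++ [c])]
      simp

theorem remove_seen_eq_alt (children path : List Int) :
    remove_seen children path = remove_seen_alt children path := by
  induction children with
  | nil => rfl
  | cons M rest ih =>
    show (if occurs_in M path then remove_seen rest path
          else [M] ++ remove_seen rest path)
        = List.foldl (fun out c => if path.contains c then out else out ++ [c])
            (if path.contains M then [] else [] ++ [M]) rest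
    rw [occurs_in_eq_contains]
    by_cases h : path.contains M = true
    · rw [if_pos h, if_pos h]; exact ih
    · rw [if_neg h, if_neg h, foldl_acc]
      rw [ih]; rfl

-- ===== VERDICT (by name: the statement is the Claim_ definition above) =====
theorem remove_seen_spec : Claim_equal_remove_seen := by
  intro children path _
  exact remove_seen_eq_alt children path
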